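-- pv_equiv track=rewrite | github.com/Ryan-215/Game_tree_based_AI_bot | overflow.py | signs_not_same
-- ===== SOURCE A (Python) =====
-- def signs_not_same(grid):
-- 	if grid:
-- 		positive = False
-- 		negative = False
-- 		# check through all grid, if both positive and negative turn True, stop checking
-- 		for row in range(len(grid)):
-- 			for col in range(len(grid[row])):
-- 				if grid[row][col] > 0:
-- 					positive = True
-- 				elif grid[row][col] < 0:
-- 					negative = True
-- 				if positive and negative:
-- 					break
-- 		if positive and negative:
-- 			return True
-- 		else:
-- 			return False
-- ===== SOURCE B (Python) =====
-- def signs_not_same(grid):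
--     if grid:
--         has_pos = any(c > 0 for row in grid for c in row)
--         has_neg = any(c < 0 for row in grid for c in row)
--         return has_pos and has_neg
-- ===== Notes on version B (the rewrite author's own statement) =====
-- stated objective: simpler
-- what changed: Replaces A's index-based nested loop maintaining two flags with an early break by two independent any() existence scans combined with 'and'.
-- outside the precondition, e.g. on signs_not_same([]): A returns None, B returns None
import Mathlib
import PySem

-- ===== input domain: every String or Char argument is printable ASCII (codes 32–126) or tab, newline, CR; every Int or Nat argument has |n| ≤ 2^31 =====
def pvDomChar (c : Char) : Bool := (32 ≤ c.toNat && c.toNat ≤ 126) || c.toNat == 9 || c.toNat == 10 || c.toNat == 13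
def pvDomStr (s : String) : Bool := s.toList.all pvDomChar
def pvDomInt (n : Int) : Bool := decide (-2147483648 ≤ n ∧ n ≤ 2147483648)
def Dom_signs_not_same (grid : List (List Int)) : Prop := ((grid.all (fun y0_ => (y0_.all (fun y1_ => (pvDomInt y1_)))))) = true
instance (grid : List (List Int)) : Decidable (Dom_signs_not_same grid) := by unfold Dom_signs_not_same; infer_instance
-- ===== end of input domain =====

-- B differs only in decomposition (two independent existence scans vs A's combined two-flag loop); equivalence is on the non-empty grid (A returns None on []).

-- ===== PORT A =====
-- inner 'for col' loop: sets the flags, breaks once both are true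
def pvAcols : List Int → Bool → Bool → Bool × Bool
  | [], p, n => (p, n)
  | c :: cs, p, n =>
    let p' := if c > 0 then true else p
    let n' := if c > 0 then n else if c < 0 then true else n
    if p' && n' then (p', n') else pvAcols cs p' n'

-- outer 'for row' loop (no break at this level in A)
def pvArows : List (List Int) → Bool → Bool → Bool × Bool
  | [], p, n => (p, n)
  | r :: rs, p, n =>
    let pn := pvAcols r p n
    pvArows rs pn.1 pn.2

def signs_not_same (grid : List (List Int)) : Bool :=
  if grid = [] then false  -- Python falls through returning None here; excluded by Pre_
  else
    let pn := pvArows grid false false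
    if pn.1 && pn.2 then true else false

-- ===== PORT B =====
def signs_not_same_alt (grid : List (List Int)) : Bool :=
  if grid = [] then false  -- Python falls through returning None here; excluded by Pre_
  else
    let has_pos := grid.any (fun row => row.any (fun c => decide (c > 0)))
    let has_neg := grid.any (fun row => row.any (fun c => decide (c < 0)))
    has_pos && has_neg

-- ===== PRECONDITION & SPEC =====
-- Pre_ excludes only the empty grid, on which Python A falls through the 'if grid:' guard and returns None, not a bool.
def Pre_signs_not_same (grid : List (List Int)) : Prop := grid ≠ []
instance (grid : List (List Int)) : Decidable (Pre_signs_not_same grid) := by unfold Pre_signs_not_same; infer_instance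
def pvWitness_signs_not_same : List (List Int) := [[1, -1]]
def Spec_signs_not_same (grid : List (List Int)) (out : Bool) : Prop := out = signs_not_same_alt grid
instance (grid : List (List Int)) (out : Bool) : Decidable (Spec_signs_not_same grid out) := by unfold Spec_signs_not_same; infer_instance

-- ===== CLAIM (what is proved, stated in full; the proofs are below) =====
def Claim_equal_signs_not_same : Prop := ∀ (grid : List (List Int)), Dom_signs_not_same grid → Pre_signs_not_same grid → Spec_signs_not_same grid (signs_not_same grid)

-- ===== LEMMAS AND PROOFS =====
theorem pvAcols_eq (row : List Int) (p n : Bool) :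
    pvAcols row p n = (p || row.any (fun c => decide (c > 0)), n || row.any (fun c => decide (c < 0))) := by
  induction row generalizing p n with
  | nil => simp [pvAcols]
  | cons c cs ih =>
    simp only [pvAcols, List.any_cons]
    have e1 : (if c > 0 then true else p) = (p || decide (c > 0)) := by
      by_cases h : c > 0 <;> simp [h]
    have e2 : (if c > 0 then n else if c < 0 then true else n) = (n || decide (c < 0)) := by
      by_cases h : c > 0
      · have h2 : ¬ c < 0 := by omega
        simp [h, h2]
      · by_cases h2 : c < 0 <;> simp [h, h2]
    rw [e1, e2]
    split_ifs with hb
    · rw [Bool.and_eq_true] at hb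
      rw [Prod.mk.injEq]
      constructor
      · rw [← Bool.or_assoc, hb.1, Bool.true_or]
      · rw [← Bool.or_assoc, hb.2, Bool.true_or]
    · rw [ih]
      simp [Bool.or_assoc]

theorem pvArows_eq (rows : List (List Int)) (p n : Bool) :
    pvArows rows p n = (p || rows.any (fun r => r.any (fun c => decide (c > 0))),
                        n || rows.any (fun r => r.any (fun c => decide (c < 0)))) := by
  induction rows generalizing p n with
  | nil => simp [pvArows]
  | cons r rs ih =>
    simp [pvArows, pvAcols_eq, ih, Bool.or_assoc]

-- ===== VERDICT (by name: the statement is the Claim_ definition above) =====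
theorem signs_not_same_spec : Claim_equal_signs_not_same := by
  intro grid _ hpre
  unfold Spec_signs_not_same signs_not_same signs_not_same_alt
  rw [if_neg hpre, if_neg hpre, pvArows_eq]
  simp only [Bool.false_or]
  cases h : ((grid.any fun r => r.any fun c => decide (0 < c)) &&
      grid.any fun r => r.any fun c => decide (c < 0)) <;> simp_all
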